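-- pv_equiv track=rewrite | github.com/maaayan3330/practiceQ-my-notebook | M+-chat-idea/longestRpeatingPrefix.py | longest_repeating_prefix
-- ===== SOURCE A (Python) =====
-- def longest_repeating_prefix(s):
--     max_len = 0
--
--     for j in range(1, len(s)):
--         i = 0
--         current_len = 0
--
--         while j < len(s) and s[i] == s[j]:
--             current_len += 1
--             i += 1
--             j += 1
--
--         max_len = max(max_len, current_len)
--
--     return max_len
-- ===== SOURCE B (Python) =====
-- def longest_repeating_prefix(s):
--     # Grow the candidate length while that prefix still occurs again later in s.
--     # Valid because occurrence of the length-(L+1) prefix implies occurrence of the length-L prefix.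
--     L = 0
--     while L + 1 < len(s) and s[:L+1] in s[1:]:
--         L += 1
--     return L
-- ===== Notes on version B (the rewrite author's own statement) =====
-- stated objective: alternative
-- what changed: Instead of A's nested scan comparing the prefix character-by-character against every suffix in pure Python, B grows a candidate length L and tests whether the length-(L+1) prefix occurs as a substring of s[1:], relying on the monotonicity of prefix occurrence.
import Mathlib
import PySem

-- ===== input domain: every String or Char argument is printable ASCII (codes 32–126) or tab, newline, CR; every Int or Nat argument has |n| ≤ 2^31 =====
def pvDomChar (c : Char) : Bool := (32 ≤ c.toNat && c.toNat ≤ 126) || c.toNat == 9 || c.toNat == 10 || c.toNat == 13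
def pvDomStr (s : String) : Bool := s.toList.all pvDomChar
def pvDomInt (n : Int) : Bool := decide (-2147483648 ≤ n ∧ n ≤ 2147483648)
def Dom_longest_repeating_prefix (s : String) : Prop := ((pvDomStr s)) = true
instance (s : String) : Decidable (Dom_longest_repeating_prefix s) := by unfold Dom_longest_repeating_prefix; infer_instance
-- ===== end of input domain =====

-- B replaces A's nested per-suffix character scan by growing a candidate length L and testing
-- whether the length-(L+1) prefix occurs as a substring of s[1:]; objective: alternative algorithm.
-- ===== PORT A =====
-- inner while loop of A: while j < len(s) and s[i] == s[j]: current_len += 1; i += 1; j += 1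
-- (cs[i]? mirrors s[i]; i < j throughout, so the i-access never fails while j < len)
def lrpWhile (cs : List Char) (i j cur : Nat) : Nat :=
  if _h : j < cs.length then
    if cs[i]? == cs[j]? then lrpWhile cs (i+1) (j+1) (cur+1) else cur
  else cur
termination_by cs.length - j

def longest_repeating_prefix (s : String) : Int :=
  let cs := s.toList
  ((List.range' 1 (cs.length - 1)).foldl
    (fun max_len j => max max_len (lrpWhile cs 0 j 0)) 0 : Nat)

-- ===== PORT B =====
-- B's while loop: while L + 1 < len(s) and s[:L+1] in s[1:]: L += 1
-- (slices with nonnegative bounds, so s[:L+1] = take (L+1), s[1:] = drop 1; 'in' = PySem.Chars.isIn)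
def bLoop (cs : List Char) (L : Nat) : Nat :=
  if _h : L + 1 < cs.length ∧ PySem.Chars.isIn (cs.take (L+1)) (cs.drop 1) = true then
    bLoop cs (L+1)
  else L
termination_by cs.length - L

def longest_repeating_prefix_alt (s : String) : Int :=
  (bLoop s.toList 0 : Nat)

-- ===== PRECONDITION & SPEC =====
def Spec_longest_repeating_prefix (s : String) (out : Int) : Prop := out = longest_repeating_prefix_alt s
instance (s : String) (out : Int) : Decidable (Spec_longest_repeating_prefix s out) := by unfold Spec_longest_repeating_prefix; infer_instance

-- ===== CLAIM (what is proved, stated in full; the proofs are below) =====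
def Claim_equal_longest_repeating_prefix : Prop := ∀ (s : String), Dom_longest_repeating_prefix s → Spec_longest_repeating_prefix s (longest_repeating_prefix s)

-- ===== LEMMAS AND PROOFS =====

-- length of the common prefix of two lists (A's inner loop computes this; proof-side helper)
def lcpZip : List Char → List Char → Nat
  | a :: as, b :: bs => if a == b then lcpZip as bs + 1 else 0
  | _, _ => 0

theorem lrpWhile_eq_lcpZip (cs : List Char) : ∀ (k j i cur : Nat), cs.length - j ≤ k →
    lrpWhile cs i j cur = cur + lcpZip (cs.drop i) (cs.drop j) := by
  intro k
  induction k with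
  | zero =>
    intro j i cur hk
    unfold lrpWhile
    have hj : ¬ j < cs.length := by omega
    have hdj : cs.drop j = [] := List.drop_eq_nil_of_le (by omega)
    simp [hj, hdj]
    cases cs.drop i <;> simp [lcpZip]
  | succ k ih =>
    intro j i cur hk
    unfold lrpWhile
    by_cases hj : j < cs.length
    · simp only [hj, dif_pos]
      by_cases hi : i < cs.length
      · have hdi : cs.drop i = cs[i] :: cs.drop (i+1) := List.drop_eq_getElem_cons hi
        have hdj : cs.drop j = cs[j] :: cs.drop (j+1) := List.drop_eq_getElem_cons hj
        rw [hdi, hdj]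
        simp only [List.getElem?_eq_getElem hi, List.getElem?_eq_getElem hj, lcpZip]
        by_cases heq : cs[i] = cs[j]
        · simp only [heq, beq_self_eq_true, if_true]
          rw [ih (j+1) (i+1) (cur+1) (by omega)]
          rw [hdi, hdj] at *
          simp_all
          omega
        · have hb : (cs[i] == cs[j]) = false := beq_eq_false_iff_ne.mpr heq
          simp [hb]
      · have hdi : cs.drop i = [] := List.drop_eq_nil_of_le (by omega)
        have hni : cs[i]? = none := List.getElem?_eq_none (by omega)
        simp [hni, List.getElem?_eq_getElem hj, hdi, lcpZip]
    · have hdj : cs.drop j = [] := List.drop_eq_nil_of_le (by omega)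
      simp [hj, hdj]
      cases cs.drop i <;> simp [lcpZip]

theorem lcpZip_le_length : ∀ (a b : List Char), lcpZip a b ≤ b.length := by
  intro a
  induction a with
  | nil => intro b; cases b <;> simp [lcpZip]
  | cons x as ih =>
    intro b
    cases b with
    | nil => simp [lcpZip]
    | cons y bs =>
      simp only [lcpZip, List.length_cons]
      split_ifs <;> [exact Nat.succ_le_succ (ih bs); omega]

theorem lcpZip_ge_iff : ∀ (L : Nat) (a b : List Char),
    L ≤ lcpZip a b ↔ a.take L = b.take L ∧ L ≤ a.length ∧ L ≤ b.length := by
  intro L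
  induction L with
  | zero => intro a b; simp
  | succ L ih =>
    intro a b
    cases a with
    | nil => cases b <;> simp [lcpZip]
    | cons x as =>
      cases b with
      | nil => simp [lcpZip]
      | cons y bs =>
        simp only [lcpZip, List.take_succ_cons, List.length_cons]
        by_cases hxy : x = y
        · simp only [hxy, beq_self_eq_true, if_true]
          rw [Nat.succ_le_succ_iff, ih as bs]
          constructor
          · rintro ⟨h1, h2, h3⟩; exact ⟨by rw [h1], by omega, by omega⟩
          · rintro ⟨h1, h2, h3⟩
            exact ⟨by injection h1, by omega, by omega⟩
        · have hb : (x == y) = false := beq_eq_false_iff_ne.mpr hxy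
          rw [if_neg (by simp [hb])]
          constructor
          · omega
          · rintro ⟨h1, -, -⟩; injection h1 with h1'; exact absurd h1' hxy

-- fold-of-max helpers
theorem foldMax_init (f : Nat → Nat) : ∀ (l : List Nat) (a : Nat),
    a ≤ l.foldl (fun m j => max m (f j)) a := by
  intro l
  induction l with
  | nil => simp
  | cons x xs ih =>
    intro a
    exact le_trans (le_max_left a (f x)) (ih _)

theorem foldMax_mem (f : Nat → Nat) : ∀ (l : List Nat) (a j : Nat), j ∈ l →
    f j ≤ l.foldl (fun m j => max m (f j)) a := by
  intro l
  induction l with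
  | nil => simp
  | cons x xs ih =>
    intro a j hj
    rcases List.mem_cons.mp hj with h | h
    · subst h; exact le_trans (le_max_right a (f j)) (foldMax_init f xs _)
    · exact ih _ j h

theorem foldMax_cases (f : Nat → Nat) : ∀ (l : List Nat) (a : Nat),
    l.foldl (fun m j => max m (f j)) a = a ∨ ∃ j ∈ l, l.foldl (fun m j => max m (f j)) a = f j := by
  intro l
  induction l with
  | nil => intro a; left; rfl
  | cons x xs ih =>
    intro a
    rcases ih (max a (f x)) with h | ⟨j, hj, h⟩
    · simp only [List.foldl_cons] at *
      rw [h]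
      rcases Nat.le_total a (f x) with hle | hle
      · right; exact ⟨x, List.mem_cons_self .., by rw [Nat.max_eq_right hle]⟩
      · left; rw [Nat.max_eq_left hle]
    · right; exact ⟨j, List.mem_cons_of_mem _ hj, h⟩

-- A's result as a fold of lcp values
def Aval (cs : List Char) : Nat :=
  (List.range' 1 (cs.length - 1)).foldl (fun m j => max m (lcpZip cs (cs.drop j))) 0

theorem mem_range'_iff (cs : List Char) (j : Nat) :
    j ∈ List.range' 1 (cs.length - 1) ↔ 1 ≤ j ∧ j < cs.length := by
  rw [List.mem_range'_1]
  omega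

theorem Aval_le (cs : List Char) : Aval cs ≤ cs.length - 1 := by
  rcases foldMax_cases (fun j => lcpZip cs (cs.drop j)) (List.range' 1 (cs.length - 1)) 0 with h | ⟨j, hj, h⟩
  · simp [Aval, h]
  · rw [(mem_range'_iff cs j)] at hj
    have := lcpZip_le_length cs (cs.drop j)
    simp only [List.length_drop] at this
    unfold Aval; rw [h]; omega

-- the substring test used by B, characterized by lcp values
theorem check_iff (cs : List Char) (K : Nat) (hK1 : 1 ≤ K) (hKn : K ≤ cs.length) :
    PySem.Chars.isIn (cs.take K) (cs.drop 1) = true ↔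
      ∃ j, 1 ≤ j ∧ j < cs.length ∧ K ≤ lcpZip cs (cs.drop j) := by
  rw [PySem.Chars.isIn_iff_infix]
  constructor
  · rintro ⟨u, v, huv⟩
    refine ⟨1 + u.length, by omega, ?_, ?_⟩
    · have hlen : cs.length - 1 = u.length + (K + v.length) := by
        have := congrArg List.length huv
        simp [List.length_take] at this
        omega
      omega
    · have hdrop : cs.drop (1 + u.length) = cs.take K ++ v := by
        have : (cs.drop 1).drop u.length = cs.drop (1 + u.length) := by
          rw [List.drop_drop]
        rw [← this, ← huv]
        simp
      rw [lcpZip_ge_iff]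
      refine ⟨?_, by omega, ?_⟩
      · rw [hdrop, List.take_append_of_le_length (by simp [List.length_take]; omega)]
        rw [List.take_take, Nat.min_self]
      · rw [hdrop]
        simp [List.length_take]
        omega
  · rintro ⟨j, hj1, hjn, hlcp⟩
    rw [lcpZip_ge_iff] at hlcp
    obtain ⟨heq, hKa, hKb⟩ := hlcp
    refine ⟨(cs.drop 1).take (j - 1), (cs.drop j).drop K, ?_⟩
    have h1 : cs.take K ++ (cs.drop j).drop K = cs.drop j := by
      rw [heq]; exact List.take_append_drop K (cs.drop j)
    have h2 : (cs.drop 1).drop (j - 1) = cs.drop j := by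
      rw [List.drop_drop]; congr 1; omega
    rw [List.append_assoc, h1, ← h2, List.take_append_drop]

-- main loop lemma: from any L ≤ Aval, bLoop lands exactly on Aval
theorem bLoop_eq_Aval (cs : List Char) : ∀ (d L : Nat), Aval cs - L ≤ d → L ≤ Aval cs →
    bLoop cs L = Aval cs := by
  intro d
  induction d with
  | zero =>
    intro L hd hL
    have hLe : L = Aval cs := by omega
    unfold bLoop
    rw [dif_neg]
    · exact hLe
    rintro ⟨hlt, hin⟩
    have := (check_iff cs (L + 1) (by omega) (by omega)).mp hin
    obtain ⟨j, hj1, hjn, hlcp⟩ := this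
    have hmem : j ∈ List.range' 1 (cs.length - 1) := (mem_range'_iff cs j).mpr ⟨hj1, hjn⟩
    have hmax : lcpZip cs (cs.drop j) ≤ Aval cs :=
      foldMax_mem (fun j => lcpZip cs (cs.drop j)) (List.range' 1 (cs.length - 1)) 0 j hmem
    omega
  | succ d ih =>
    intro L hd hL
    by_cases hLM : L = Aval cs
    · unfold bLoop
      rw [dif_neg]
      · exact hLM
      rintro ⟨hlt, hin⟩
      have := (check_iff cs (L + 1) (by omega) (by omega)).mp hin
      obtain ⟨j, hj1, hjn, hlcp⟩ := this
      have hmem : j ∈ List.range' 1 (cs.length - 1) := (mem_range'_iff cs j).mpr ⟨hj1, hjn⟩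
      have hmax : lcpZip cs (cs.drop j) ≤ Aval cs :=
        foldMax_mem (fun j => lcpZip cs (cs.drop j)) (List.range' 1 (cs.length - 1)) 0 j hmem
      omega
    · have hlt : L < Aval cs := by omega
      have hMn : Aval cs ≤ cs.length - 1 := Aval_le cs
      have hn2 : 2 ≤ cs.length := by omega
      -- Aval is attained at some j (it is ≥ 1 > 0 here)
      rcases foldMax_cases (fun j => lcpZip cs (cs.drop j)) (List.range' 1 (cs.length - 1)) 0 with h0 | ⟨j, hj, hjv⟩
      · exfalso
        have h0' : Aval cs = 0 := h0
        omega
      · have hjm := (mem_range'_iff cs j).mp hj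
        have hjv' : Aval cs = lcpZip cs (cs.drop j) := hjv
        have hlcp : L + 1 ≤ lcpZip cs (cs.drop j) := by omega
        have hin : PySem.Chars.isIn (cs.take (L+1)) (cs.drop 1) = true :=
          (check_iff cs (L + 1) (by omega) (by omega)).mpr ⟨j, hjm.1, hjm.2, hlcp⟩
        unfold bLoop
        rw [dif_pos ⟨by omega, hin⟩]
        exact ih (L + 1) (by omega) (by omega)

-- ===== VERDICT (by name: the statement is the Claim_ definition above) =====
theorem longest_repeating_prefix_spec : Claim_equal_longest_repeating_prefix := by
  intro s _
  unfold Spec_longest_repeating_prefix longest_repeating_prefix longest_repeating_prefix_alt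
  have h : (fun (max_len : Nat) j => max max_len (lrpWhile s.toList 0 j 0))
      = (fun (m : Nat) j => max m (lcpZip s.toList (s.toList.drop j))) := by
    funext m j
    rw [lrpWhile_eq_lcpZip s.toList (s.toList.length) j 0 0 (by omega)]
    simp
  simp only [h]
  rw [bLoop_eq_Aval s.toList (Aval s.toList) 0 (by omega) (by omega)]
  rfl
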